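-- pv_equiv track=rewrite | github.com/yuantongkang/font-subset-tool | .github/scripts/process-font.py | split_by_unicode_range
-- ===== SOURCE A (Python) =====
-- def split_by_unicode_range(codepoints):
--     """Split by Unicode range"""
--     if not codepoints:
--         return []
--
--     groups = []
--     current_group = [codepoints[0]]
--     block_size = 1024
--
--     for i in range(1, len(codepoints)):
--         current_cp = codepoints[i]
--         last_cp = current_group[-1]
--
--         current_block = current_cp // block_size
--         last_block = last_cp // block_size
--
--         if current_cp == last_cp + 1 or current_block == last_block:
--             current_group.append(current_cp)
--         else:
--             groups.append(current_group)
--             current_group = [current_cp]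
--
--     if current_group:
--         groups.append(current_group)
--
--     return groups
-- ===== SOURCE B (Python) =====
-- def split_by_unicode_range(codepoints):
--     """Split by Unicode range (run detection + slicing instead of element accumulation)"""
--     groups = []
--     n = len(codepoints)
--     start = 0
--     while start < n:
--         i = start + 1
--         while i < n and (codepoints[i] == codepoints[i - 1] + 1
--                          or codepoints[i] // 1024 == codepoints[i - 1] // 1024):
--             i += 1
--         groups.append(codepoints[start:i])
--         start = i
--     return groups
-- ===== Notes on version B (the rewrite author's own statement) =====
-- stated objective: alternative
-- what changed: Instead of accumulating a current_group element by element and flushing it at each break, B scans each maximal run with an inner index loop and emits it as one slice codepoints[start:i], comparing adjacent codepoints directly.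
import Mathlib
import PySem

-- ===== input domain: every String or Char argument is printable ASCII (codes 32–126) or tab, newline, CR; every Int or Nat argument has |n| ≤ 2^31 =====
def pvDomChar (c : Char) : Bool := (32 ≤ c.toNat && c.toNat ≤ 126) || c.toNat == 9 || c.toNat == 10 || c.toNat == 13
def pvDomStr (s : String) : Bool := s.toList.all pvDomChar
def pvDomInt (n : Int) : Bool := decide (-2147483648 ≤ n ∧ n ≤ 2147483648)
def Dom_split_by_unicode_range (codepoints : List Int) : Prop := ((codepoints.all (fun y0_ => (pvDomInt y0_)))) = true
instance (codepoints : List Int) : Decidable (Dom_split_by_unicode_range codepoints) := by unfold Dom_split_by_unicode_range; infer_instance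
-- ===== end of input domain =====

-- B replaces A's element-by-element group accumulation by run detection with slicing
-- (find the end of each maximal run, emit it as one slice); objective: alternative
-- decomposition, same O(n) cost.

-- ===== PORT A =====
-- Literal port of A: fold over range(1, len(codepoints)); pyGetD is safe here because
-- every index Python uses (i ∈ [1, len), 0, and -1 on the nonempty current_group) is in range.
def split_by_unicode_range (codepoints : List Int) : List (List Int) :=
  if codepoints = [] then []
  else
    let block_size : Int := 1024
    let st := (PySem.List.pyRange 1 (PySem.List.len codepoints) 1).foldl
      (fun (st : List (List Int) × List Int) i =>
        let current_cp := PySem.List.pyGetD codepoints i 0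
        let last_cp := PySem.List.pyGetD st.2 (-1) 0
        let current_block := PySem.Int.floordiv current_cp block_size
        let last_block := PySem.Int.floordiv last_cp block_size
        if current_cp = last_cp + 1 ∨ current_block = last_block then
          (st.1, st.2 ++ [current_cp])
        else
          (st.1 ++ [st.2], [current_cp]))
      ([], [PySem.List.pyGetD codepoints 0 0])
    if st.2 ≠ [] then st.1 ++ [st.2] else st.1

-- ===== PORT B =====
-- B's inner while-loop scans forward while the adjacent pair stays in the same run and then
-- slices the run off; ported as structural recursion on the suffix: splitSpanRun prev xs
-- returns (the rest of the run begun by prev, the remaining suffix), i.e. exactly the two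
-- slices codepoints[start+1:i] and codepoints[i:] that B's indices delimit.
def splitSpanRun (prev : Int) : List Int → List Int × List Int
  | [] => ([], [])
  | c :: cs =>
    if c = prev + 1 ∨ PySem.Int.floordiv c 1024 = PySem.Int.floordiv prev 1024 then
      let p := splitSpanRun c cs
      (c :: p.1, p.2)
    else ([], c :: cs)

-- termination measure for the outer loop's port (cited by decreasing_by below)
theorem splitSpanRun_snd_length_le (prev : Int) (xs : List Int) :
    (splitSpanRun prev xs).2.length ≤ xs.length := by
  induction xs generalizing prev with
  | nil => simp [splitSpanRun]
  | cons c cs ih =>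
    simp only [splitSpanRun]
    split
    · exact Nat.le_succ_of_le (ih c)
    · simp

-- B's outer while-loop: one iteration per emitted run (codepoints[start:i] = x :: run).
def split_by_unicode_range_alt : List Int → List (List Int)
  | [] => []
  | x :: xs =>
    let p := splitSpanRun x xs
    (x :: p.1) :: split_by_unicode_range_alt p.2
termination_by l => l.length
decreasing_by
  exact Nat.lt_succ_of_le (splitSpanRun_snd_length_le x xs)

-- ===== PRECONDITION & SPEC =====
def Spec_split_by_unicode_range (codepoints : List Int) (out : List (List Int)) : Prop := out = split_by_unicode_range_alt codepoints
instance (codepoints : List Int) (out : List (List Int)) : Decidable (Spec_split_by_unicode_range codepoints out) := by unfold Spec_split_by_unicode_range; infer_instance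

-- ===== CLAIM (what is proved, stated in full; the proofs are below) =====
def Claim_equal_split_by_unicode_range : Prop := ∀ (codepoints : List Int), Dom_split_by_unicode_range codepoints → Spec_split_by_unicode_range codepoints (split_by_unicode_range codepoints)

-- ===== LEMMAS AND PROOFS =====

-- A's loop step, with the current codepoint already fetched.
def pvStep (st : List (List Int) × List Int) (c : Int) : List (List Int) × List Int :=
  if c = PySem.List.pyGetD st.2 (-1) 0 + 1 ∨
      PySem.Int.floordiv c 1024 = PySem.Int.floordiv (PySem.List.pyGetD st.2 (-1) 0) 1024 then
    (st.1, st.2 ++ [c])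
  else
    (st.1 ++ [st.2], [c])

theorem pvLast_append_singleton (ys : List Int) (c : Int) :
    PySem.List.pyGetD (ys ++ [c]) (-1) 0 = c := by
  simp [PySem.List.pyGetD, PySem.List.pyGet?, PySem.List.pyIdx?]

-- Loop invariant: A's remaining fold, finished A-style, yields the open group extended by
-- the current run and then B's grouping of the remaining suffix.
theorem pvLoop (rest : List Int) (gs : List (List Int)) (cur : List Int) (l : Int)
    (hcur : cur ≠ []) (hlast : PySem.List.pyGetD cur (-1) 0 = l) :
    (let st := rest.foldl pvStep (gs, cur);
     if st.2 ≠ [] then st.1 ++ [st.2] else st.1)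
      = gs ++ (cur ++ (splitSpanRun l rest).1) ::
          split_by_unicode_range_alt (splitSpanRun l rest).2 := by
  induction rest generalizing gs cur l with
  | nil => simp [splitSpanRun, split_by_unicode_range_alt, hcur]
  | cons c cs ih =>
    simp only [List.foldl_cons, splitSpanRun]
    by_cases hok : c = l + 1 ∨ PySem.Int.floordiv c 1024 = PySem.Int.floordiv l 1024
    · have hstep : pvStep (gs, cur) c = (gs, cur ++ [c]) := by
        simp only [pvStep, hlast]; rw [if_pos hok]
      rw [hstep, ih gs (cur ++ [c]) c (by simp) (pvLast_append_singleton cur c), if_pos hok]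
      simp
    · have hstep : pvStep (gs, cur) c = (gs ++ [cur], [c]) := by
        simp only [pvStep, hlast]; rw [if_neg hok]
      rw [hstep, ih (gs ++ [cur]) [c] c (by simp) (pvLast_append_singleton [] c), if_neg hok]
      rw [split_by_unicode_range_alt]
      simp

-- ===== VERDICT (by name: the statement is the Claim_ definition above) =====
theorem split_by_unicode_range_spec : Claim_equal_split_by_unicode_range := by
  intro codepoints _hdom
  unfold Spec_split_by_unicode_range split_by_unicode_range
  cases codepoints with
  | nil => simp [split_by_unicode_range_alt]
  | cons x xs =>
    simp only [if_neg (List.cons_ne_nil x xs)]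
    show (let st := (PySem.List.pyRange 1 (PySem.List.len (x :: xs)) 1).foldl
            (fun st i => pvStep st (PySem.List.pyGetD (x :: xs) i 0))
            ([], [PySem.List.pyGetD (x :: xs) 0 0]);
          if st.2 ≠ [] then st.1 ++ [st.2] else st.1)
        = split_by_unicode_range_alt (x :: xs)
    rw [show PySem.List.pyGetD (x :: xs) 0 0 = x by simp [pysem]]
    rw [PySem.List.foldl_pyRange_pyGetD (x :: xs) 0 pvStep ([], [x]) (by omega : (0:Int) ≤ 1)]
    rw [show List.drop (Int.toNat 1) (x :: xs) = xs from rfl]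
    rw [pvLoop xs [] [x] x (by simp) (pvLast_append_singleton [] x)]
    rw [split_by_unicode_range_alt]
    simp
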